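-- pv_equiv track=rewrite | github.com/abhipsa14/Leetcode_questions | 0868-binary-gap/0868-binary-gap.py | binaryGap
-- ===== SOURCE A (Python) =====
-- def binaryGap(n: int) -> int:
--     num=bin(n)[2:]
--     last=-1
--     maxi=0
--     for i in range(len(num)):
--         if num[i]=='1':
--             if last!=-1:
--                 maxi=max(maxi,i-last)
--             last=i
--     return maxi
-- ===== SOURCE B (Python) =====
-- def binaryGap(n: int) -> int:
--     num = bin(n)[2:]
--     pos = [i for i, c in enumerate(num) if c == '1']
--     return max((b - a for a, b in zip(pos, pos[1:])), default=0)
-- ===== Notes on version B (the rewrite author's own statement) =====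
-- stated objective: idiomatic
-- what changed: Replaces the online last-set-bit state machine with a two-phase decomposition: collect the indices of set bits in one comprehension, then take the max of consecutive differences over zip(pos, pos[1:]).
import Mathlib
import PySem

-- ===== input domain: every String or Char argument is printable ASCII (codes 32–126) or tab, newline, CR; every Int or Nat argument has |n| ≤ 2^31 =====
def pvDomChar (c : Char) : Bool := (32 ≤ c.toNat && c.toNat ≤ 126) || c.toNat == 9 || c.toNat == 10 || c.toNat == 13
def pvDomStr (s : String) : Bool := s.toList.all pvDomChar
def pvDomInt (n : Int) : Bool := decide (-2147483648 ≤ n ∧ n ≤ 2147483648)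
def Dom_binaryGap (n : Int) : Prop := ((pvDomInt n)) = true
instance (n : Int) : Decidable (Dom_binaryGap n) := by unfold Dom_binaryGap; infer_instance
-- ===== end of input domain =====

-- B replaces A's online last-set-bit tracking by collecting the set-bit indices
-- and taking the max of consecutive differences (idiomatic two-phase decomposition).


-- shared primitive: the characters of Python's bin(n)[2:]
-- (for n < 0, bin(n) = '-0b…', so [2:] keeps the 'b'; exact for all Int)
def natBits (n : Nat) : List Char :=
  if h : n = 0 then [] else natBits (n / 2) ++ [if n % 2 = 1 then '1' else '0']
  decreasing_by exact Nat.div_lt_self (Nat.pos_of_ne_zero h) (by norm_num)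

def binStr (n : Int) : List Char :=
  if n = 0 then ['0']
  else if n < 0 then 'b' :: natBits (-n).toNat
  else natBits n.toNat

-- ===== PORT A =====
def binaryGap (n : Int) : Int :=
  let num := binStr n
  let st := num.zipIdx.foldl
    (fun (st : Int × Int) (p : Char × Nat) =>
      if p.1 = '1' then
        ((p.2 : Int), if st.1 ≠ -1 then max st.2 ((p.2 : Int) - st.1) else st.2)
      else st) (-1, 0)
  st.2

-- ===== PORT B =====
def binaryGap_alt (n : Int) : Int :=
  let pos : List Int := ((binStr n).zipIdx.filter (fun p => p.1 = '1')).map (fun p => (p.2 : Int))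
  (pos.zip pos.tail).foldl (fun m pq => max m (pq.2 - pq.1)) 0

-- ===== PRECONDITION & SPEC =====
def Spec_binaryGap (n : Int) (out : Int) : Prop := out = binaryGap_alt n
instance (n : Int) (out : Int) : Decidable (Spec_binaryGap n out) := by unfold Spec_binaryGap; infer_instance

-- ===== CLAIM (what is proved, stated in full; the proofs are below) =====
def Claim_equal_binaryGap : Prop := ∀ (n : Int), Dom_binaryGap n → Spec_binaryGap n (binaryGap n)

-- ===== LEMMAS AND PROOFS =====

-- A's fold over all characters only acts on '1' entries:
-- it equals the same state machine folded over B's position list.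
theorem foldA_filter (l : List (Char × Nat)) (s : Int × Int) :
    l.foldl (fun (st : Int × Int) (p : Char × Nat) =>
      if p.1 = '1' then
        ((p.2 : Int), if st.1 ≠ -1 then max st.2 ((p.2 : Int) - st.1) else st.2)
      else st) s
    = ((l.filter (fun p => p.1 = '1')).map (fun p => ((p.2 : Int)))).foldl
        (fun (st : Int × Int) (i : Int) =>
          (i, if st.1 ≠ -1 then max st.2 (i - st.1) else st.2)) s := by
  induction l generalizing s with
  | nil => rfl
  | cons p rest ih =>
    by_cases h : p.1 = '1' <;>
      simp only [List.foldl_cons, List.filter_cons, h, decide_true, decide_false,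
        if_pos, if_neg, List.map_cons] <;> simpa using ih _

-- the state machine, once 'last' is a real index, computes the max over consecutive pairs
theorem foldA_zip (ps : List Int) (l m : Int) (hl : l ≠ -1)
    (hps : ∀ x ∈ ps, (0:Int) ≤ x) :
    (ps.foldl (fun (st : Int × Int) (i : Int) =>
        (i, if st.1 ≠ -1 then max st.2 (i - st.1) else st.2)) (l, m)).2
    = ((l :: ps).zip ps).foldl (fun m pq => max m (pq.2 - pq.1)) m := by
  induction ps generalizing l m with
  | nil => rfl
  | cons p rest ih =>
    have hp : (p : Int) ≠ -1 := by
      have := hps p (by simp); omega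
    have hrest : ∀ x ∈ rest, (0:Int) ≤ x := fun x hx => hps x (by simp [hx])
    simp only [List.foldl_cons, List.zip_cons_cons, if_pos hl]
    rw [ih p (max m (p - l)) hp hrest]

theorem foldA_top (ps : List Int) (hps : ∀ x ∈ ps, (0:Int) ≤ x) :
    (ps.foldl (fun (st : Int × Int) (i : Int) =>
        (i, if st.1 ≠ -1 then max st.2 (i - st.1) else st.2)) (-1, 0)).2
    = (ps.zip ps.tail).foldl (fun m pq => max m (pq.2 - pq.1)) 0 := by
  cases ps with
  | nil => rfl
  | cons p rest =>
    have hp : p ≠ -1 := by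
      have := hps p (by simp); omega
    have hrest : ∀ x ∈ rest, (0:Int) ≤ x := fun x hx => hps x (by simp [hx])
    simp only [List.foldl_cons, if_neg (by simp : ¬ ((-1:Int) ≠ -1)), List.tail_cons]
    rw [foldA_zip rest p 0 hp hrest]

theorem foldA_combined (l : List (Char × Nat)) :
    (l.foldl (fun (st : Int × Int) (p : Char × Nat) =>
        if p.1 = '1' then
          ((p.2 : Int), if st.1 ≠ -1 then max st.2 ((p.2 : Int) - st.1) else st.2)
        else st) (-1, 0)).2
    = (((l.filter (fun p => p.1 = '1')).map (fun p => ((p.2 : Int)))).zip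
        ((l.filter (fun p => p.1 = '1')).map (fun p => ((p.2 : Int)))).tail).foldl
        (fun m pq => max m (pq.2 - pq.1)) 0 := by
  rw [foldA_filter]
  exact foldA_top _ (by
    intro x hx
    obtain ⟨p, _, rfl⟩ := List.mem_map.mp hx
    exact Int.natCast_nonneg _)

theorem binaryGap_eq (n : Int) : binaryGap n = binaryGap_alt n :=
  foldA_combined (binStr n).zipIdx

-- ===== VERDICT (by name: the statement is the Claim_ definition above) =====
theorem binaryGap_spec : Claim_equal_binaryGap := by
  intro n _
  unfold Spec_binaryGap
  exact binaryGap_eq n
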